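-- pv_equiv track=rewrite | github.com/Jae-soon/Algorithmic | Programmers/ssgp1.py | find
-- ===== SOURCE A (Python) =====
-- def find(alien_list, depth, b):
--     depth = 0
--     for ailen in alien_list:
--         left, right = ailen
--
--         for i in range(left, right):
--             if i in b:
--                 b.remove(i)
--                 depth += 1
--
--     return depth
-- ===== SOURCE B (Python) =====
-- def find(alien_list, depth, b):
--     # Count occurrences of each value once; keep only the non-empty intervals; for each
--     # distinct value count how many kept intervals contain it. Each interval can remove
--     # at most one copy of a value, so the answer is sum of min(count, #covering intervals).
--     # (Unlike A, this does not mutate b; equivalence is about the return value.)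
--     cnt = {}
--     for v in b:
--         cnt[v] = cnt.get(v, 0) + 1
--     spans = [(left, right) for left, right in alien_list if left < right]
--     total = 0
--     for v, c in cnt.items():
--         ranges = sum(1 for left, right in spans if left <= v < right)
--         total += min(c, ranges)
--     return total
-- ===== Notes on version B (the rewrite author's own statement) =====
-- stated objective: alternative
-- what changed: Replaces the per-integer scan of every interval (membership test and remove on b for each integer in each range) by a one-pass occurrence count of b plus, per distinct value, a count of covering non-empty intervals, summing min(count, covering intervals); B does not mutate b (the equivalence is about the return value).
import Mathlib
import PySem

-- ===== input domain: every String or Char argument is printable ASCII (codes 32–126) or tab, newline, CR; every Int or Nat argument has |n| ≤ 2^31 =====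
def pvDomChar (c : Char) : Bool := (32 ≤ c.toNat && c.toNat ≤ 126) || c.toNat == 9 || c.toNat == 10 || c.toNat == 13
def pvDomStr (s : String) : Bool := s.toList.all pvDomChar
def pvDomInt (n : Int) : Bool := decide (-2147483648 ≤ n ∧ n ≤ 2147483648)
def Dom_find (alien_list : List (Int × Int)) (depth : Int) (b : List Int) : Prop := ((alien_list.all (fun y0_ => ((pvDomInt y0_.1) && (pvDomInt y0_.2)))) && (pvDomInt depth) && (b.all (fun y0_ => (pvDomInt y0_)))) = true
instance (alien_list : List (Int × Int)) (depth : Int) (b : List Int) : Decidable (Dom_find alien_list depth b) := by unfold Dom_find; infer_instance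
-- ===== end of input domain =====

-- B counts occurrences in b once and, per distinct value, the covering non-empty intervals,
-- summing min(count, covering intervals), instead of A's per-integer scan of every interval.
-- A mutates b in place (remove); B does not: the equivalence proved is about the RETURN value.

-- ===== PORT A =====
-- inner loop: 'for i in range(left, right): if i in b: b.remove(i); depth += 1'
def findInner (left right : Int) (st : List Int × Int) : List Int × Int :=
  (PySem.List.pyRange left right 1).foldl
    (fun st2 i =>
      if i ∈ st2.1 then (((PySem.List.remove? st2.1 i).getD st2.1), st2.2 + 1) else st2) st

def find (alien_list : List (Int × Int)) (depth : Int) (b : List Int) : Int :=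
  -- 'depth = 0': A discards its depth argument
  (alien_list.foldl (fun st ailen => findInner ailen.1 ailen.2 st) (b, (0 : Int))).2

-- ===== PORT B =====
-- 'sum(1 for left, right in alien_list if left <= v < right)'
def rangesCount (alien_list : List (Int × Int)) (v : Int) : Int :=
  alien_list.foldl (fun a p => if p.1 ≤ v ∧ v < p.2 then a + 1 else a) 0

def find_alt (alien_list : List (Int × Int)) (depth : Int) (b : List Int) : Int :=
  let cnt := b.foldl (fun d v => d.insert v (d.getD v 0 + 1)) (PySem.Dict.empty)
  let spans := alien_list.filter (fun p => p.1 < p.2)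
  cnt.items.foldl (fun total vc => total + min vc.2 (rangesCount spans vc.1)) 0

-- ===== PRECONDITION & SPEC =====
def Spec_find (alien_list : List (Int × Int)) (depth : Int) (b : List Int) (out : Int) : Prop := out = find_alt alien_list depth b
instance (alien_list : List (Int × Int)) (depth : Int) (b : List Int) (out : Int) : Decidable (Spec_find alien_list depth b out) := by unfold Spec_find; infer_instance

-- ===== CLAIM (what is proved, stated in full; the proofs are below) =====
def Claim_equal_find : Prop := ∀ (alien_list : List (Int × Int)) (depth : Int) (b : List Int), Dom_find alien_list depth b → Spec_find alien_list depth b (find alien_list depth b)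

-- ===== LEMMAS AND PROOFS =====

theorem rangesCount_aux (v : Int) (al : List (Int × Int)) : ∀ (a : Int),
    al.foldl (fun a p => if p.1 ≤ v ∧ v < p.2 then a + 1 else a) a
      = a + (al.countP (fun p => decide (p.1 ≤ v ∧ v < p.2)) : Int) := by
  induction al with
  | nil => intro a; simp
  | cons p al ih =>
    intro a
    simp only [List.foldl_cons, List.countP_cons, decide_eq_true_eq]
    split_ifs with h <;> rw [ih] <;> push_cast <;> ring

theorem rangesCount_eq_countP (al : List (Int × Int)) (v : Int) :
    rangesCount al v = (al.countP (fun p => decide (p.1 ≤ v ∧ v < p.2)) : Int) := by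
  unfold rangesCount
  rw [rangesCount_aux]
  ring

theorem rangesCount_nonneg (al : List (Int × Int)) (v : Int) : 0 ≤ rangesCount al v := by
  rw [rangesCount_eq_countP]; positivity

-- The inner interval loop: counts of covered present values drop by one; depth gains
-- the number of integers of [left,right) present in b.
theorem findInner_aux (n : Nat) : ∀ (left right : Int), (right - left).toNat = n →
    ∀ (b : List Int) (d : Int),
    ((findInner left right (b, d)).1.count = fun v =>
        b.count v - (if left ≤ v ∧ v < right ∧ v ∈ b then 1 else 0)) ∧
    (findInner left right (b, d)).2 =
      d + ((PySem.List.pyRange left right 1).countP (fun i => decide (i ∈ b)) : Int) := by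
  induction n with
  | zero =>
    intro left right hn b d
    have hle : right ≤ left := by omega
    simp only [findInner, PySem.List.pyRange_one_eq_nil hle, List.foldl_nil, List.countP_nil]
    refine ⟨funext fun v => ?_, by simp⟩
    rw [if_neg (by rintro ⟨hh1, hh2, _⟩; omega)]
    simp
  | succ n ih =>
    intro left right hn b d
    have hlt : left < right := by omega
    have hrec := ih (left + 1) right (by omega)
    simp only [findInner, PySem.List.pyRange_one_cons hlt, List.foldl_cons]
    by_cases hmem : left ∈ b
    · rw [if_pos hmem, PySem.List.remove?_eq_some_erase b left hmem, Option.getD_some]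
      obtain ⟨h1, h2⟩ := hrec (b.erase left) (d + 1)
      refine ⟨funext fun v => ?_, ?_⟩
      · have hcv := congrFun h1 v
        simp only [findInner] at hcv
        rw [hcv]
        by_cases hv : v = left
        · subst hv
          rw [List.count_erase_self, if_neg (by rintro ⟨hh, _⟩; omega),
              if_pos ⟨le_refl _, hlt, hmem⟩]
          omega
        · have hiff : (left + 1 ≤ v ∧ v < right ∧ v ∈ b.erase left)
              ↔ (left ≤ v ∧ v < right ∧ v ∈ b) := by
            rw [List.mem_erase_of_ne hv]
            constructor <;> rintro ⟨ha, hb2, hc⟩ <;> exact ⟨by omega, hb2, hc⟩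
          rw [List.count_erase_of_ne hv, if_congr hiff rfl rfl]
      · simp only [findInner] at h2
        rw [h2, List.countP_cons]
        have hcong : (PySem.List.pyRange (left + 1) right).countP (fun i => decide (i ∈ b.erase left))
            = (PySem.List.pyRange (left + 1) right).countP (fun i => decide (i ∈ b)) := by
          apply List.countP_congr
          intro x hx
          have hxr := PySem.List.mem_pyRange_one.mp hx
          simp only [decide_eq_true_eq]
          exact List.mem_erase_of_ne (by omega)
        rw [hcong]
        simp only [hmem, decide_true, if_true]
        push_cast
        ring
    · rw [if_neg hmem]
      obtain ⟨h1, h2⟩ := hrec b d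
      refine ⟨funext fun v => ?_, ?_⟩
      · have hcv := congrFun h1 v
        simp only [findInner] at hcv
        rw [hcv]
        have hiff : (left + 1 ≤ v ∧ v < right ∧ v ∈ b)
            ↔ (left ≤ v ∧ v < right ∧ v ∈ b) := by
          constructor <;> rintro ⟨ha, hb2, hc⟩
          · exact ⟨by omega, hb2, hc⟩
          · refine ⟨?_, hb2, hc⟩
            rcases eq_or_ne v left with hv | hv
            · exact absurd (hv ▸ hc) hmem
            · omega
        rw [if_congr hiff rfl rfl]
      · simp only [findInner] at h2
        rw [h2, List.countP_cons]
        simp [hmem]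

theorem findInner_char (left right : Int) (b : List Int) (d : Int) :
    ((findInner left right (b, d)).1.count = fun v =>
        b.count v - (if left ≤ v ∧ v < right ∧ v ∈ b then 1 else 0)) ∧
    (findInner left right (b, d)).2 =
      d + ((PySem.List.pyRange left right 1).countP (fun i => decide (i ∈ b)) : Int) :=
  findInner_aux (right - left).toNat left right rfl b d

-- the number of integers of [l,r) present in b, counted over any nodup key list covering b
theorem countP_range_eq_keys (l r : Int) (b keys : List Int) (hnd : keys.Nodup)
    (hsup : ∀ v ∈ b, v ∈ keys) :
    (PySem.List.pyRange l r 1).countP (fun i => decide (i ∈ b)) =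
    keys.countP (fun v => decide (l ≤ v ∧ v < r ∧ v ∈ b)) := by
  rw [List.countP_eq_length_filter, List.countP_eq_length_filter]
  apply List.Perm.length_eq
  rw [List.perm_ext_iff_of_nodup ((PySem.List.nodup_pyRange_one l r).filter _) (hnd.filter _)]
  intro x
  simp only [List.mem_filter, PySem.List.mem_pyRange_one, decide_eq_true_eq]
  constructor
  · rintro ⟨⟨hx1, hx2⟩, hx3⟩; exact ⟨hsup x hx3, hx1, hx2, hx3⟩
  · rintro ⟨_, hx1, hx2, hx3⟩; exact ⟨⟨hx1, hx2⟩, hx3⟩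

-- outer loop characterisation, over any duplicate-free key list covering b's values
theorem find_outer (al : List (Int × Int)) : ∀ (b : List Int) (d : Int) (keys : List Int),
    keys.Nodup → (∀ v ∈ b, v ∈ keys) →
    (al.foldl (fun st ailen => findInner ailen.1 ailen.2 st) (b, d)).2 =
      d + (keys.map (fun v => min ((b.count v : Int)) (rangesCount al v))).sum := by
  induction al with
  | nil =>
    intro b d keys hnd hsup
    simp only [List.foldl_nil]
    have hz : keys.map (fun v => min ((b.count v : Int)) (rangesCount [] v))
        = keys.map (fun _ => (0 : Int)) := by
      apply List.map_congr_left
      intro v _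
      simp [rangesCount]
    rw [hz]
    simp
  | cons p al ih =>
    obtain ⟨l, r⟩ := p
    intro b d keys hnd hsup
    simp only [List.foldl_cons]
    obtain ⟨h1, h2⟩ := findInner_char l r b d
    rw [show findInner l r (b, d) = ((findInner l r (b, d)).1, (findInner l r (b, d)).2) from rfl]
    rw [ih (findInner l r (b, d)).1 (findInner l r (b, d)).2 keys hnd ?hsup]
    case hsup =>
      intro v hv
      have hcv := congrFun h1 v
      have hpos : 0 < (findInner l r (b, d)).1.count v := List.count_pos_iff.mpr hv
      rw [hcv] at hpos
      exact hsup v (List.count_pos_iff.mp (by split at hpos <;> omega))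
    rw [h2, countP_range_eq_keys l r b keys hnd hsup]
    have hmap : keys.map (fun v => min ((b.count v : Int)) (rangesCount ((l, r) :: al) v))
        = keys.map (fun v => (if (l ≤ v ∧ v < r ∧ v ∈ b) then (1 : Int) else 0)
            + min (((findInner l r (b, d)).1.count v : Int)) (rangesCount al v)) := by
      apply List.map_congr_left
      intro v _
      have hcv := congrFun h1 v
      have hR : rangesCount ((l, r) :: al) v
          = rangesCount al v + (if (l ≤ v ∧ v < r) then (1 : Int) else 0) := by
        rw [rangesCount_eq_countP, rangesCount_eq_countP, List.countP_cons]
        simp only [decide_eq_true_eq]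
        push_cast
        split <;> ring
      have hRn := rangesCount_nonneg al v
      rw [hcv, hR]
      by_cases hvb : v ∈ b
      · have hcp : 0 < b.count v := List.count_pos_iff.mpr hvb
        have he : (l ≤ v ∧ v < r ∧ v ∈ b) ↔ (l ≤ v ∧ v < r) := by
          constructor
          · rintro ⟨x1, x2, _⟩; exact ⟨x1, x2⟩
          · rintro ⟨x1, x2⟩; exact ⟨x1, x2, hvb⟩
        simp only [he]
        by_cases hlr : l ≤ v ∧ v < r
        · simp only [if_pos hlr]
          rw [Nat.cast_sub hcp]
          push_cast
          omega
        · simp only [if_neg hlr]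
          simp
      · have hcp : b.count v = 0 := List.count_eq_zero.mpr hvb
        have hA : ¬ (l ≤ v ∧ v < r ∧ v ∈ b) := by rintro ⟨_, _, hh⟩; exact hvb hh
        simp only [if_neg hA, hcp]
        split_ifs <;> simp <;> omega
    rw [hmap, PySem.List.sum_map_add_int]
    have hcnt : (keys.map (fun v => if (l ≤ v ∧ v < r ∧ v ∈ b) then (1 : Int) else 0)).sum
        = (keys.countP (fun v => decide (l ≤ v ∧ v < r ∧ v ∈ b)) : Int) := by
      rw [← PySem.List.sum_map_ite_one_zero (fun v => decide (l ≤ v ∧ v < r ∧ v ∈ b)) keys]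
      apply congrArg
      apply List.map_congr_left
      intro v _
      simp
    rw [hcnt]
    ring

-- empty intervals cover nothing: filtering them does not change the covering count
theorem rangesCount_filter (al : List (Int × Int)) (v : Int) :
    rangesCount (al.filter (fun p => p.1 < p.2)) v = rangesCount al v := by
  rw [rangesCount_eq_countP, rangesCount_eq_countP, List.countP_filter]
  congr 1
  apply List.countP_congr
  intro p _
  simp only [Bool.and_eq_true, decide_eq_true_eq]
  constructor
  · rintro ⟨⟨h1, h2⟩, _⟩; exact ⟨h1, h2⟩
  · rintro ⟨h1, h2⟩; exact ⟨⟨h1, h2⟩, by omega⟩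

-- ===== VERDICT (by name: the statement is the Claim_ definition above) =====
theorem find_spec : Claim_equal_find := by
  intro al depth b _
  simp only [Spec_find, find, find_alt]
  rw [PySem.Dict.foldl_insert_getD_add_one_eq_counter, PySem.Dict.items_counter,
      find_outer al b 0 (PySem.Set.ofList b) (PySem.Set.nodup_ofList b)
        (fun v hv => (PySem.Set.mem_ofList b v).mpr hv),
      List.foldl_map, PySem.List.foldl_add]
  apply congrArg
  apply congrArg List.sum
  apply List.map_congr_left
  intro v _
  rw [rangesCount_filter]
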